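-- pv_equiv track=rewrite | github.com/giangkarry/Elgamal | TextProcessing.py | textToNum
-- ===== SOURCE A (Python) =====
-- def charToInt(char, alphabet):
-- 	return alphabet.find(char)
--
-- def invStr(str):
-- 	return str[::-1]
--
-- def textToNum(text, alphabet):
-- 	num = 0
-- 	base = 1
-- 	alp = len(alphabet)
-- 	for i in invStr(text):
-- 		cti = charToInt(i, alphabet)
-- 		num += cti * base
-- 		base *= alp
-- 	return num
-- ===== SOURCE B (Python) =====
-- def textToNum(text, alphabet):
--     num = 0
--     for char in text:
--         num = num * len(alphabet) + alphabet.find(char)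
--     return num
-- ===== Notes on version B (the rewrite author's own statement) =====
-- stated objective: simpler
-- what changed: Replaces the reversed-string walk with an explicit positional-weight accumulator (base *= alp) by a left-to-right Horner update num = num*len(alphabet) + alphabet.find(char), dropping the reversal and the base variable.
import Mathlib
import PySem

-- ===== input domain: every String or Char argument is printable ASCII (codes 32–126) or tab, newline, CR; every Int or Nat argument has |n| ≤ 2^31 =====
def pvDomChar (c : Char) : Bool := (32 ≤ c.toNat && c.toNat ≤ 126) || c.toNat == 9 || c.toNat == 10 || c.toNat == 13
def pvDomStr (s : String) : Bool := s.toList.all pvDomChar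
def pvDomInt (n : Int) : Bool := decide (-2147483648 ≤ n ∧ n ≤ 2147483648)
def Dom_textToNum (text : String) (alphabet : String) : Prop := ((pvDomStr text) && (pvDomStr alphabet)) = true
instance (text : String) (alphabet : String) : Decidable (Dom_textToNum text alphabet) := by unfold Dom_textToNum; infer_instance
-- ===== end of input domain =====

-- B: left-to-right Horner update (num = num*len(alphabet) + find) replacing A's reversed
-- walk with a separate positional-weight accumulator; same return value, no speed claim.

-- ===== PORT A =====
-- charToInt(char, alphabet) = alphabet.find(char)
def charToInt (char : Char) (alphabet : String) : Int :=
  PySem.Chars.find alphabet.toList [char]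

-- invStr(str) = str[::-1]
def invStr (s : String) : List Char :=
  (PySem.List.slice? s.toList none none (-1)).getD []

-- loop: for i in invStr(text): num += charToInt(i)*base; base *= alp
def textToNum (text : String) (alphabet : String) : Int :=
  let alp : Int := (PySem.Str.len alphabet : Int)
  ((invStr text).foldl
    (fun (st : Int × Int) i => (st.1 + charToInt i alphabet * st.2, st.2 * alp))
    (0, 1)).1

-- ===== PORT B =====
def textToNum_alt (text : String) (alphabet : String) : Int :=
  text.toList.foldl
    (fun num char => num * (PySem.Str.len alphabet : Int) + PySem.Chars.find alphabet.toList [char])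
    0

-- ===== PRECONDITION & SPEC =====
def Spec_textToNum (text : String) (alphabet : String) (out : Int) : Prop := out = textToNum_alt text alphabet
instance (text : String) (alphabet : String) (out : Int) : Decidable (Spec_textToNum text alphabet out) := by unfold Spec_textToNum; infer_instance

-- ===== CLAIM (what is proved, stated in full; the proofs are below) =====
def Claim_equal_textToNum : Prop := ∀ (text : String) (alphabet : String), Dom_textToNum text alphabet → Spec_textToNum text alphabet (textToNum text alphabet)

-- ===== LEMMAS AND PROOFS =====

-- A's loop over a list m, with general start state
theorem pvA_loop (al : List Char) (alp : Int) (m : List Char) (num base : Int) :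
    (m.foldl (fun (st : Int × Int) i =>
        (st.1 + PySem.Chars.find al [i] * st.2, st.2 * alp)) (num, base)).1
      = num + base * (m.reverse.foldl (fun n c => n * alp + PySem.Chars.find al [c]) 0) := by
  induction m generalizing num base with
  | nil => simp
  | cons c m ih =>
      simp only [List.foldl_cons, List.reverse_cons, List.foldl_append, List.foldl_cons,
        List.foldl_nil]
      rw [ih]
      ring

-- ===== VERDICT (by name: the statement is the Claim_ definition above) =====
theorem textToNum_spec : Claim_equal_textToNum := by
  intro text alphabet _
  unfold Spec_textToNum textToNum textToNum_alt invStr charToInt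
  rw [PySem.List.slice?_none_none_neg_one]
  simp only [Option.getD_some]
  rw [pvA_loop]
  simp
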